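-- pv_equiv track=rewrite | github.com/aniketmondal1210/GFG-Chronicles | Difficulty: Easy/Move all negative elements to end/move_all_negative_elements_to_end.py | segregateElements
-- ===== SOURCE A (Python) =====
-- def segregateElements(arr):
--     # Your code goes here
--     pos = []
--     neg = []
--     for i in arr:
--         if i >= 0:
--             pos.append(i)
--         else:
--             neg.append(i)
--
--     arr[:] = pos + neg
--     return arr
-- ===== SOURCE B (Python) =====
-- def segregateElements(arr):
--     # Stable sort on the boolean key "is negative": non-negatives (False) keep
--     # their order and precede negatives (True), which also keep their order.
--     arr[:] = sorted(arr, key=lambda x: x < 0)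
--     return arr
-- ===== Notes on version B (the rewrite author's own statement) =====
-- stated objective: idiomatic
-- what changed: Replaces the explicit two-list partition loop with a single stable sort keyed on the boolean 'x < 0'.
import Mathlib
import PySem

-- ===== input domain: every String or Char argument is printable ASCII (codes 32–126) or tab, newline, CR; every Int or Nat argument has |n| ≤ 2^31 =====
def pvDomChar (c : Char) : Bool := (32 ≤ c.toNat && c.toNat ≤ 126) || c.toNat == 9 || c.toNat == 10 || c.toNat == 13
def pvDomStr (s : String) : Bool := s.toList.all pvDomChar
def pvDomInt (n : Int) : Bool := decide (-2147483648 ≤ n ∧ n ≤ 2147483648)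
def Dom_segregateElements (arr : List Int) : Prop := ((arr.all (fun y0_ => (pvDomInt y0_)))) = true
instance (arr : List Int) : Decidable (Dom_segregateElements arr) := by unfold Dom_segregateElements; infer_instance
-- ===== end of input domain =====

-- B replaces A's explicit two-list partition loop with a single stable sort keyed on
-- 'x < 0' (idiomatic; same return value). A mutates arr in place via arr[:] = ...; B
-- performs the same slice assignment, so the proved equivalence (on the return value)
-- covers the observable effect too.

-- ===== PORT A =====
def segregateElements (arr : List Int) : List Int :=
  let pn := arr.foldl
    (fun (pn : List Int × List Int) i =>
      if i ≥ 0 then (pn.1 ++ [i], pn.2) else (pn.1, pn.2 ++ [i]))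
    ([], [])
  pn.1 ++ pn.2

-- ===== PORT B =====
def segregateElements_alt (arr : List Int) : List Int :=
  PySem.List.sorted arr (fun x => decide (x < 0)) false

-- ===== PRECONDITION & SPEC =====
def Spec_segregateElements (arr : List Int) (out : List Int) : Prop := out = segregateElements_alt arr
instance (arr : List Int) (out : List Int) : Decidable (Spec_segregateElements arr out) := by unfold Spec_segregateElements; infer_instance

-- ===== CLAIM (what is proved, stated in full; the proofs are below) =====
def Claim_equal_segregateElements : Prop := ∀ (arr : List Int), Dom_segregateElements arr → Spec_segregateElements arr (segregateElements arr)

-- ===== LEMMAS AND PROOFS =====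

-- Inserting an element with key false into P ++ N (keys of P false, keys of N true)
-- places it exactly between P and N.
theorem insertBy_key_false (k : Int → Bool) (x : Int) (P N : List Int)
    (hx : k x = false) (hP : ∀ y ∈ P, k y = false) (hN : ∀ y ∈ N, k y = true) :
    PySem.List.insertBy (fun a b => decide (k a < k b)) x (P ++ N) = P ++ x :: N := by
  induction P with
  | nil =>
    cases N with
    | nil => simp [PySem.List.insertBy]
    | cons y ys =>
      have hy := hN y (by simp)
      simp [PySem.List.insertBy, hx, hy]
  | cons p ps ih =>
    have hp := hP p (by simp)
    simp only [List.cons_append, PySem.List.insertBy, hx, hp]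
    simp only [decide_eq_true_eq]
    rw [if_neg (by simp)]
    simp [ih (fun y hy => hP y (by simp [hy]))]

-- Inserting an element with key true goes to the very end.
theorem insertBy_key_true (k : Int → Bool) (x : Int) (L : List Int)
    (hx : k x = true) :
    PySem.List.insertBy (fun a b => decide (k a < k b)) x L = L ++ [x] := by
  induction L with
  | nil => simp [PySem.List.insertBy]
  | cons y ys ih =>
    simp only [PySem.List.insertBy, hx]
    rw [if_neg (by simp [Bool.lt_iff])]
    simp [ih]

-- Loop invariant for the insertion-sort fold with a boolean key.
theorem sorted_fold_split (k : Int → Bool) (xs P N : List Int)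
    (hP : ∀ y ∈ P, k y = false) (hN : ∀ y ∈ N, k y = true) :
    xs.foldl (fun acc x => PySem.List.insertBy (fun a b => decide (k a < k b)) x acc) (P ++ N)
      = (P ++ xs.filter (fun x => !k x)) ++ (N ++ xs.filter k) := by
  induction xs generalizing P N with
  | nil => simp
  | cons x t ih =>
    by_cases hx : k x = true
    · rw [List.foldl_cons, insertBy_key_true k x (P ++ N) hx, List.append_assoc]
      rw [ih P (N ++ [x]) hP (by intro y hy; rcases List.mem_append.1 hy with h | h
                                 · exact hN y h
                                 · simp at h; simpa [h] using hx)]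
      simp [List.filter_cons, hx]
    · have hx' : k x = false := by simpa using hx
      rw [List.foldl_cons, insertBy_key_false k x P N hx' hP hN]
      have : P ++ x :: N = (P ++ [x]) ++ N := by simp
      rw [this, ih (P ++ [x]) N (by intro y hy; rcases List.mem_append.1 hy with h | h
                                    · exact hP y h
                                    · simp at h; simpa [h] using hx') hN]
      simp [List.filter_cons, hx']

-- sorted with a boolean key is exactly the stable two-way partition.
theorem sorted_bool_key (k : Int → Bool) (xs : List Int) :
    PySem.List.sorted xs (fun x => k x) false
      = xs.filter (fun x => !k x) ++ xs.filter k := by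
  rw [PySem.List.sorted_eq_foldl_insertBy]
  simpa using sorted_fold_split k xs [] [] (by simp) (by simp)

-- A's fold builds exactly the two filters.
theorem partition_fold (xs P N : List Int) :
    xs.foldl (fun (pn : List Int × List Int) i =>
        if i ≥ 0 then (pn.1 ++ [i], pn.2) else (pn.1, pn.2 ++ [i])) (P, N)
      = (P ++ xs.filter (fun i => decide (i ≥ 0)), N ++ xs.filter (fun i => decide (¬ i ≥ 0))) := by
  induction xs generalizing P N with
  | nil => simp
  | cons x t ih =>
    by_cases hx : x ≥ 0 <;> simp [List.filter_cons, hx, ih]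

-- ===== VERDICT (by name: the statement is the Claim_ definition above) =====
theorem segregateElements_spec : Claim_equal_segregateElements := by
  intro arr _
  show segregateElements arr = segregateElements_alt arr
  unfold segregateElements segregateElements_alt
  rw [partition_fold arr [] [], sorted_bool_key (fun x => decide (x < 0)) arr]
  simp only [List.nil_append]
  congr 1
  · exact List.filter_congr (by intro x _; simp [← decide_not, decide_eq_decide, not_lt, ge_iff_le])
  · exact List.filter_congr (by intro x _; simp [not_le, decide_eq_decide])
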